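-- pv_equiv track=rewrite | github.com/umeshmehta6551/3rd_july_Data_Science | health-disease-prediction/main .py | mark_symptom
-- ===== SOURCE A (Python) =====
-- def mark_symptom(b,n):
--     s=0;
--     for i in range(0,n):
--       if(i*b<n):
--         s+=i*b
--       else:
--         s=s+i
--     return s
-- ===== SOURCE B (Python) =====
-- def mark_symptom(b, n):
--     if n <= 0:
--         return 0
--     if b <= 0:
--         k = n
--     else:
--         k = min(n, (n - 1) // b + 1)
--     def tri(m):
--         return m * (m + 1) // 2
--     return b * tri(k - 1) + (tri(n - 1) - tri(k - 1))
-- ===== Notes on version B (the rewrite author's own statement) =====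
-- stated objective: faster
-- what changed: Replaced the O(n) loop by an O(1) closed form: compute the split index k below which i*b<n, then use triangular-number sums for the two arithmetic series.
import Mathlib
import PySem

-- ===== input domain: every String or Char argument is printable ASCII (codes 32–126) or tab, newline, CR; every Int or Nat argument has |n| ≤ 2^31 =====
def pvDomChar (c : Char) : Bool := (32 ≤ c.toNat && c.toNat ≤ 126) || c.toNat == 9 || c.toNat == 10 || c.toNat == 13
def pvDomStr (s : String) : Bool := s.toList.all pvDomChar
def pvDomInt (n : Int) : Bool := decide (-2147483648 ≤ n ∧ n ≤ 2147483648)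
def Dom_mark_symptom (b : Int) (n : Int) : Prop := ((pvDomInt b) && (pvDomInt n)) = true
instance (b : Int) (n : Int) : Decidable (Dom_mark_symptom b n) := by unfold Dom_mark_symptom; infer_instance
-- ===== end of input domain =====

-- B replaces A's O(n) loop with an O(1) closed form (split index + triangular-number sums); objective: faster.


-- ===== PORT A =====
def mark_symptom (b : Int) (n : Int) : Int :=
  (PySem.List.pyRange 0 n 1).foldl (fun s i => if i * b < n then s + i * b else s + i) 0

-- ===== PORT B =====
-- tri m = m*(m+1)//2 (Python floor division, exact here since m*(m+1) is even)
def pvTri (m : Int) : Int := PySem.Int.floordiv (m * (m + 1)) 2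

def mark_symptom_alt (b : Int) (n : Int) : Int :=
  if n ≤ 0 then 0
  else
    let k : Int := if b ≤ 0 then n else min n (PySem.Int.floordiv (n - 1) b + 1)
    b * pvTri (k - 1) + (pvTri (n - 1) - pvTri (k - 1))

-- ===== PRECONDITION & SPEC =====
def Spec_mark_symptom (b : Int) (n : Int) (out : Int) : Prop := out = mark_symptom_alt b n
instance (b : Int) (n : Int) (out : Int) : Decidable (Spec_mark_symptom b n out) := by unfold Spec_mark_symptom; infer_instance

-- ===== CLAIM (what is proved, stated in full; the proofs are below) =====
def Claim_equal_mark_symptom : Prop := ∀ (b : Int) (n : Int), Dom_mark_symptom b n → Spec_mark_symptom b n (mark_symptom b n)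

-- ===== LEMMAS AND PROOFS =====

-- tri is the triangular number: 2 * tri m = m * (m + 1)
theorem pvTri_two_mul (m : Int) : 2 * pvTri m = m * (m + 1) := by
  obtain ⟨t, ht⟩ := Int.even_mul_succ_self m
  have hm : m * (m + 1) = 2 * t := by omega
  unfold pvTri
  rw [hm, PySem.Int.floordiv_eq_ediv_of_pos (by omega)]
  omega

theorem pvTri_succ (m : Int) : pvTri m = pvTri (m - 1) + m := by
  have h1 := pvTri_two_mul m
  have h2 := pvTri_two_mul (m - 1)
  nlinarith [h1, h2]

theorem pvTri_neg_one : pvTri (-1) = 0 := by decide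

-- The loop over range(0, m) with a downward-closed condition (true exactly below k) equals the closed form.
theorem fold_closed (b n k : Int) (hk : 0 ≤ k) (m : Nat)
    (h : ∀ i : Int, 0 ≤ i → i < (m : Int) → (i * b < n ↔ i < k)) :
    (PySem.List.pyRange 0 (m : Int) 1).foldl
        (fun s i => if i * b < n then s + i * b else s + i) 0
      = b * pvTri (min (m : Int) k - 1) + (pvTri ((m : Int) - 1) - pvTri (min (m : Int) k - 1)) := by
  induction m with
  | zero =>
    simp
    have : min (0 : Int) k = 0 := by omega
    rw [this]
    simp [pvTri_neg_one]
  | succ m ih =>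
    have hstep : PySem.List.pyRange 0 ((m : Int) + 1) 1
        = PySem.List.pyRange 0 (m : Int) 1 ++ [(m : Int)] :=
      PySem.List.pyRange_one_succ_right (by positivity)
    have hcast : ((m + 1 : Nat) : Int) = (m : Int) + 1 := by push_cast; ring
    rw [hcast, hstep, List.foldl_append]
    have ih' := ih (fun i h0 hi => h i h0 (by omega))
    rw [ih']
    by_cases hc : (m : Int) * b < n
    · have hmk : (m : Int) < k := (h m (by positivity) (by omega)).1 hc
      have h1 : min ((m : Int) + 1) k = (m : Int) + 1 := by omega
      have h2 : min (m : Int) k = (m : Int) := by omega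
      rw [h1, h2]
      simp only [List.foldl_cons, List.foldl_nil, if_pos hc]
      have e : ((m : Int) + 1 - 1) = (m : Int) := by ring
      rw [e, pvTri_succ ((m : Int))]
      ring
    · have hmk : ¬ (m : Int) < k := fun hlt => hc ((h m (by positivity) (by omega)).2 hlt)
      have h1 : min ((m : Int) + 1) k = k := by omega
      have h2 : min (m : Int) k = k := by omega
      rw [h1, h2]
      simp only [List.foldl_cons, List.foldl_nil, if_neg hc]
      have e : ((m : Int) + 1 - 1) = (m : Int) := by ring
      rw [e, pvTri_succ ((m : Int))]
      ring

-- ===== VERDICT (by name: the statement is the Claim_ definition above) =====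
theorem mark_symptom_spec : Claim_equal_mark_symptom := by
  intro b n _
  unfold Spec_mark_symptom mark_symptom mark_symptom_alt
  by_cases hn : n ≤ 0
  · rw [if_pos hn, PySem.List.pyRange_one_eq_nil (by omega)]
    rfl
  · rw [if_neg hn]
    push_neg at hn
    have hnn : ((n.toNat : Int)) = n := Int.toNat_of_nonneg (by omega)
    by_cases hb : b ≤ 0
    · -- k = n : every i in [0, n) satisfies i * b ≤ 0 < n
      have h := fold_closed b n n (by omega) n.toNat
        (fun i h0 hi => by
          rw [hnn] at hi
          constructor
          · intro _; exact hi
          · intro _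
            have : i * b ≤ 0 := mul_nonpos_of_nonneg_of_nonpos h0 hb
            omega)
      rw [hnn] at h
      rw [h]
      simp [hb]
    · -- b > 0 : i * b < n ↔ i ≤ (n-1) // b
      push_neg at hb
      set q : Int := PySem.Int.floordiv (n - 1) b with hq
      have hqe : q = (n - 1) / b := by
        rw [hq, PySem.Int.floordiv_eq_ediv_of_pos hb]
      have hiff : ∀ i : Int, (i * b < n ↔ i ≤ q) := by
        intro i
        rw [hqe]
        rw [Int.le_ediv_iff_mul_le hb]
        omega
      have h := fold_closed b n (min n (q + 1)) (by
          have := hiff 0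
          have h0 : (0 : Int) * b < n := by omega
          have := (hiff 0).1 h0
          omega) n.toNat
        (fun i h0 hi => by
          rw [hnn] at hi
          have := hiff i
          omega)
      rw [hnn] at h
      rw [h]
      have hk1 : min n (min n (q + 1)) = min n (q + 1) := by omega
      rw [hk1]
      simp [not_le.2 hb]
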